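-- pv_equiv track=rewrite | github.com/MrBrantCode/unitest_baseline | mut_generate/mist_train_cf/cf_46548/solution.py | find_factorial_entity
-- ===== SOURCE A (Python) =====
-- def find_factorial_entity(num):
--     if num < 0 or not float(num).is_integer():
--         return None
--
--     fact = 1
--     i = 1
--     while fact < num:
--         i += 1
--         fact *= i
--
--     return i if fact == num else None
-- ===== SOURCE B (Python) =====
-- def find_factorial_entity(num):
--     if num < 0 or not float(num).is_integer():
--         return None
--     n = int(num)
--     if n == 0:
--         return None
--     d = 1
--     while n > 1:
--         d += 1
--         if n % d != 0:
--             return None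
--         n //= d
--     return d
-- ===== Notes on version B (the rewrite author's own statement) =====
-- stated objective: alternative
-- what changed: Instead of building factorials 1,2,6,... upward until reaching num, B factors num by trial division with consecutive divisors 2,3,4,... downward (n //= d), returning the last divisor when n reaches 1; num == 0 is special-cased to None.
import Mathlib
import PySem

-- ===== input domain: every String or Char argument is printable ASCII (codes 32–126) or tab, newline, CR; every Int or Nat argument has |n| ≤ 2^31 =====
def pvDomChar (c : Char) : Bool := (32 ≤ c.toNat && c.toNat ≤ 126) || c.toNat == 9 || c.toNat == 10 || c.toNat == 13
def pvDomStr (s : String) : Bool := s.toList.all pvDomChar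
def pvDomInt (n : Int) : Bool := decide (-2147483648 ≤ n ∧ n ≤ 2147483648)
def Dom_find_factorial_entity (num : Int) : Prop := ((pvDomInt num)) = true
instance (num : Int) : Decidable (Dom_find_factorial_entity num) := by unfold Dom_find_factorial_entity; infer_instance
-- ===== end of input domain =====

-- B replaces A's upward factorial-building loop by trial division of num with consecutive
-- divisors 2,3,4,... (alternative decomposition; same exact behaviour).

-- ===== PORT A =====
-- A's while loop 'while fact < num: i += 1; fact *= i', fuelled (fact grows by ≥ 1 per
-- step, so num.toNat + 1 fuel is always enough; proved in the lemmas below).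
def loopA (fuel : Nat) (num fact i : Int) : Int × Int :=
  match fuel with
  | 0 => (fact, i)
  | fuel + 1 => if fact < num then loopA fuel num (fact * (i + 1)) (i + 1) else (fact, i)

-- 'float(num).is_integer()' is always True for a Python int, so only 'num < 0' can bail out.
def find_factorial_entity (num : Int) : Option Int :=
  if num < 0 then none
  else
    let r := loopA (num.toNat + 1) num 1 1
    if r.1 = num then some r.2 else none

-- ===== PORT B =====
-- B's while loop 'while n > 1: d += 1; (return None if n % d) ; n //= d', fuelled
-- (n shrinks by at least half per step, so num.toNat + 1 fuel is always enough).
def loopB (fuel : Nat) (n d : Int) : Option Int :=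
  match fuel with
  | 0 => none
  | fuel + 1 =>
    if 1 < n then
      if PySem.Int.mod n (d + 1) ≠ 0 then none
      else loopB fuel (PySem.Int.floordiv n (d + 1)) (d + 1)
    else some d

def find_factorial_entity_alt (num : Int) : Option Int :=
  if num < 0 then none
  else if num = 0 then none
  else loopB (num.toNat + 1) num 1

-- ===== PRECONDITION & SPEC =====
def Spec_find_factorial_entity (num : Int) (out : Option Int) : Prop := out = find_factorial_entity_alt num
instance (num : Int) (out : Option Int) : Decidable (Spec_find_factorial_entity num out) := by unfold Spec_find_factorial_entity; infer_instance

-- ===== CLAIM (what is proved, stated in full; the proofs are below) =====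
def Claim_equal_find_factorial_entity : Prop := ∀ (num : Int), Dom_find_factorial_entity num → Spec_find_factorial_entity num (find_factorial_entity num)

-- ===== LEMMAS AND PROOFS =====

def fac (k : Nat) : Int := (Nat.factorial k : Int)

lemma fac_pos (k : Nat) : 0 < fac k := by
  simpa [fac] using Int.natCast_pos.mpr (Nat.factorial_pos k)

lemma fac_succ (k : Nat) : fac (k + 1) = fac k * ((k : Int) + 1) := by
  simp [fac, Nat.factorial_succ]
  ring

lemma fac_lt_fac {k m : Nat} (hk : 1 ≤ k) (h : k < m) : fac k < fac m := by
  have := (Nat.factorial_lt (by omega : 0 < k)).mpr h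
  simpa [fac] using Int.ofNat_lt.mpr this

lemma fac_inj {k m : Nat} (hk : 1 ≤ k) (hm : 1 ≤ m) (h : fac k = fac m) : k = m := by
  rcases lt_trichotomy k m with hlt | heq | hgt
  · exact absurd h (ne_of_lt (fac_lt_fac hk hlt))
  · exact heq
  · exact absurd h.symm (ne_of_lt (fac_lt_fac hm hgt))

-- A's loop, started at (fact, i) = (k!, k), stops at the first m ≥ k with num ≤ m!.
lemma loopA_spec : ∀ (fuel : Nat) (num : Int) (k : Nat), 1 ≤ k →
    (num - fac k).toNat < fuel →
    ∃ m : Nat, k ≤ m ∧ loopA fuel num (fac k) (k : Int) = (fac m, (m : Int)) ∧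
      num ≤ fac m ∧ ∀ j : Nat, k ≤ j → j < m → fac j < num := by
  intro fuel
  induction fuel with
  | zero => intro num k hk hfuel; omega
  | succ fuel ih =>
    intro num k hk hfuel
    by_cases h : fac k < num
    · have hcast : fac k * ((k : Int) + 1) = fac (k + 1) := (fac_succ k).symm
      have hgrow : fac k + 1 ≤ fac (k + 1) := by
        have h1 : 0 < fac k := fac_pos k
        have : fac k * 2 ≤ fac k * ((k : Int) + 1) := by
          apply mul_le_mul_of_nonneg_left _ (le_of_lt h1)
          have : (1 : Int) ≤ (k : Int) := by exact_mod_cast hk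
          omega
        omega
      have hfuel' : (num - fac (k + 1)).toNat < fuel := by omega
      obtain ⟨m, hkm, heq, hle, hall⟩ := ih num (k + 1) (by omega) hfuel'
      refine ⟨m, by omega, ?_, hle, ?_⟩
      · have : loopA (fuel + 1) num (fac k) (k : Int)
            = loopA fuel num (fac k * ((k : Int) + 1)) ((k : Int) + 1) := by
          simp [loopA, h]
        rw [this, hcast]
        have : ((k : Int) + 1) = ((k + 1 : Nat) : Int) := by push_cast; ring
        rw [this]; exact heq
      · intro j hkj hjm
        rcases Nat.eq_or_lt_of_le hkj with rfl | hkj'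
        · exact h
        · exact hall j (by omega) hjm
    · exact ⟨k, le_refl k, by simp [loopA, h], by omega, by omega⟩

-- B's loop is sound: a returned d satisfies n · k! = d!.
lemma loopB_sound : ∀ (fuel : Nat) (n : Int) (k : Nat) (j : Int), 1 ≤ n → 1 ≤ k →
    loopB fuel n (k : Int) = some j →
    ∃ m : Nat, k ≤ m ∧ j = (m : Int) ∧ n * fac k = fac m := by
  intro fuel
  induction fuel with
  | zero => intro n k j _ _ h; simp [loopB] at h
  | succ fuel ih =>
    intro n k j hn hk h
    by_cases h1 : 1 < n
    · simp only [loopB, if_pos h1] at h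
      by_cases hmod : PySem.Int.mod n ((k : Int) + 1) = 0
      · rw [if_neg (not_not_intro hmod)] at h
        have hdvd : ((k : Int) + 1) ∣ n := (PySem.Int.mod_eq_zero_iff_dvd n _).mp hmod
        obtain ⟨q, hq⟩ := hdvd
        have hkpos : (0 : Int) < (k : Int) + 1 := by positivity
        have hq1 : 1 ≤ q := by nlinarith
        have hdiveq : PySem.Int.floordiv n ((k : Int) + 1) = q := by
          rw [PySem.Int.floordiv_eq_ediv_of_pos hkpos, hq]
          exact Int.mul_ediv_cancel_left q (by omega)
        have hc : ((k : Int) + 1) = ((k + 1 : Nat) : Int) := by push_cast; ring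
        rw [hdiveq, hc] at h
        obtain ⟨m, hkm, hj, hfac⟩ := ih q (k + 1) j hq1 (by omega) h
        refine ⟨m, by omega, hj, ?_⟩
        rw [hq]
        calc ((k : Int) + 1) * q * fac k = q * (fac k * ((k : Int) + 1)) := by ring
          _ = q * fac (k + 1) := by rw [← fac_succ]
          _ = fac m := hfac
      · rw [if_pos (by simpa using hmod)] at h
        exact absurd h (by simp)
    · have hn1 : n = 1 := by omega
      have hj : some ((k : Int)) = some j := by simpa [loopB, h1] using h
      exact ⟨k, le_refl k, (Option.some.inj hj).symm, by rw [hn1]; ring⟩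

-- B's loop is complete: if n · k! = m! with k ≤ m then it returns m.
lemma loopB_complete : ∀ (fuel : Nat) (n : Int) (k m : Nat), 1 ≤ n → 1 ≤ k → k ≤ m →
    n * fac k = fac m → n.toNat < fuel → loopB fuel n (k : Int) = some (m : Int) := by
  intro fuel
  induction fuel with
  | zero => intro n k m hn _ _ _ hfuel; omega
  | succ fuel ih =>
    intro n k m hn hk hkm hfac hfuel
    by_cases h1 : 1 < n
    · have hklt : k < m := by
        rcases Nat.eq_or_lt_of_le hkm with rfl | h; · nlinarith [fac_pos k]
        · exact h
      obtain ⟨Q, hQ⟩ := Nat.factorial_dvd_factorial (by omega : k + 1 ≤ m)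
      have hQint : fac m = fac (k + 1) * (Q : Int) := by
        simp [fac, hQ]
      have hfk := fac_pos k
      have hneq : n = ((k : Int) + 1) * (Q : Int) := by
        have : n * fac k = fac k * (((k : Int) + 1) * (Q : Int)) := by
          rw [hfac, hQint, fac_succ]; ring
        have := mul_left_cancel₀ (ne_of_gt hfk) (by linarith [this] : fac k * n = fac k * (((k : Int) + 1) * (Q : Int)))
        exact this
      have hQ1 : (1 : Int) ≤ (Q : Int) := by nlinarith [fac_pos m, fac_pos (k + 1), hQint]
      have hmod : PySem.Int.mod n ((k : Int) + 1) = 0 :=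
        (PySem.Int.mod_eq_zero_iff_dvd n _).mpr ⟨(Q : Int), hneq⟩
      have hdiveq : PySem.Int.floordiv n ((k : Int) + 1) = (Q : Int) := by
        rw [PySem.Int.floordiv_eq_ediv_of_pos (by positivity), hneq]
        exact Int.mul_ediv_cancel_left _ (by omega)
      have hQfac : (Q : Int) * fac (k + 1) = fac m := by rw [hQint]; ring
      have hQlt : (Q : Int) < n := by
        have hk1 : (1 : Int) ≤ (k : Int) := by exact_mod_cast hk
        nlinarith
      have hrec := ih (Q : Int) (k + 1) m hQ1 (by omega) (by omega)
        (by rw [hQfac]) (by omega)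
      have hc : ((k : Int) + 1) = ((k + 1 : Nat) : Int) := by push_cast; ring
      simp only [loopB, if_pos h1]
      rw [if_neg (not_not_intro hmod), hdiveq, hc, hrec]
    · have hn1 : n = 1 := by omega
      have hkm' : k = m := fac_inj hk (by omega) (by rw [← hfac, hn1]; ring)
      simp [loopB, h1, hkm']

-- ===== VERDICT (by name: the statement is the Claim_ definition above) =====
theorem find_factorial_entity_spec : Claim_equal_find_factorial_entity := by
  unfold Claim_equal_find_factorial_entity Spec_find_factorial_entity
  intro num _
  by_cases hneg : num < 0
  · simp [find_factorial_entity, find_factorial_entity_alt, hneg]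
  · by_cases h0 : num = 0
    · subst h0; decide
    · have hpos : 1 ≤ num := by omega
      have hfuel : (num - fac 1).toNat < num.toNat + 1 := by
        simp [fac, Nat.factorial]
      obtain ⟨m, hm1, heq, hle, hall⟩ := loopA_spec (num.toNat + 1) num 1 (le_refl 1) hfuel
      have hfac1 : fac 1 = 1 := by simp [fac, Nat.factorial]
      have heq' : loopA (num.toNat + 1) num 1 1 = (fac m, (m : Int)) := by
        have := heq; rw [hfac1] at this; simpa using this
      rw [find_factorial_entity, find_factorial_entity_alt, if_neg hneg, if_neg hneg, if_neg h0]
      simp only [heq']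
      by_cases hfm : fac m = num
      · rw [if_pos hfm]
        have := loopB_complete (num.toNat + 1) num 1 m hpos (le_refl 1) hm1
          (by rw [hfac1, hfm.symm]; ring) (by omega)
        simpa using this.symm
      · rw [if_neg hfm]
        cases eB : loopB (num.toNat + 1) num ((1 : Nat) : Int) with
        | none => rfl
        | some j =>
          obtain ⟨m', hm'1, rfl, hfac'⟩ := loopB_sound (num.toNat + 1) num 1 j hpos (le_refl 1) eB
          rw [hfac1] at hfac'
          have hfm' : fac m' = num := by linarith [hfac']
          rcases lt_trichotomy m' m with hlt | heq2 | hgt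
          · exact absurd hfm' (ne_of_lt (hall m' hm'1 hlt))
          · exact absurd (heq2 ▸ hfm') hfm
          · have : fac m < fac m' := fac_lt_fac (by omega) hgt
            omega
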